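-- pv_equiv track=rewrite | github.com/jsw7524/Leetcode | 2850. Minimum Moves to Spread Stones Over Grid/2850. Minimum Moves to Spread Stones Over Grid.py | BFS
-- ===== SOURCE A (Python) =====
-- def BFS(grid, y, x):
--     queue=[(y,x,0)]
--     while len(queue)>0:
--         nY, nX, step  = queue.pop(0)
--         if grid[nY][nX] <= 1:
--             if nX-1 >= 0:
--                 queue.append((nY, nX-1, step+1)) # type: ignore
--             if nX+1 < 3:
--                 queue.append((nY, nX+1, step+1))# type: ignore
--             if nY-1 >= 0:
--                 queue.append((nY-1, nX, step+1))# type: ignore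
--             if nY+1 < 3:
--                 queue.append((nY+1, nX, step+1))# type: ignore
--         else:
--             return (nY, nX, step)
-- ===== SOURCE B (Python) =====
-- from collections import deque
--
-- def BFS(grid, y, x):
--     # Pass 1: value-free BFS from (y, x) recording the visitation order (cell, step).
--     order = []
--     seen = {(y, x)}
--     dq = deque([(y, x, 0)])
--     while dq:
--         nY, nX, step = dq.popleft()
--         order.append((nY, nX, step))
--         for mY, mX in ((nY, nX - 1), (nY, nX + 1), (nY - 1, nX), (nY + 1, nX)):
--             if 0 <= mX < 3 and 0 <= mY < 3 and (mY, mX) not in seen: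
--                 seen.add((mY, mX))
--                 dq.append((mY, mX, step + 1))
--     # Pass 2: first cell in that order holding more than one stone.
--     for nY, nX, step in order:
--         if grid[nY][nX] > 1:
--             return (nY, nX, step)
-- ===== Notes on version B (the rewrite author's own statement) =====
-- stated objective: alternative
-- what changed: B replaces A's duplicate-re-expanding FIFO queue interleaved with value tests by two passes: a visited-set deque BFS over coordinates only, which precomputes the grid-value-independent visitation order, followed by a single linear scan of that order for the first cell holding more than one stone.
-- outside the precondition, e.g. on BFS([[0, 0, 9], [0, 0, 0], [0, 0, 0]], -3, 0): A returns (-3, 2, 2), B returns None; on BFS([[2, 0, 0], [0, 0, 0], [0, 0, 0]], -1, -1): A returns (0, 0, 2), B returns None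
import Mathlib
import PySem

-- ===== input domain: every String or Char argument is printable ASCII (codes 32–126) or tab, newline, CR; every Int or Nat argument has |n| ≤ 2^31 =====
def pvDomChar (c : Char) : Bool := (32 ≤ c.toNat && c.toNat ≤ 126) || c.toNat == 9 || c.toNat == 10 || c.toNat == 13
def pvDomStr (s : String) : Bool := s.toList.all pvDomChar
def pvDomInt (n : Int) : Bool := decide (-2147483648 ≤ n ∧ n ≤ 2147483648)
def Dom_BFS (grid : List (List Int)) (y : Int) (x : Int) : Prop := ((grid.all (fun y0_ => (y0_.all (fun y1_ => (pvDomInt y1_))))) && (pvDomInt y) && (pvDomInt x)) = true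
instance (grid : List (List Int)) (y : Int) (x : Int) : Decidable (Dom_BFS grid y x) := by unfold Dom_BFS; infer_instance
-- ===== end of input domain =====

-- B precomputes the grid-value-independent BFS visitation order (visited-set BFS over coordinates),
-- then scans that order for the first cell holding more than one stone; equivalence is about the
-- return value (neither program mutates its arguments).

-- ===== PORT A =====
-- Python's 'while queue' may diverge (no cell > 1): the loop carries fuel and returns none
-- where Python diverges or raises IndexError; Pre_BFS excludes both.
def BFS.loop (grid : List (List Int)) : Nat → List (Int × Int × Int) → Option (Int × Int × Int)
  | _, [] => none
  | 0, _ :: _ => none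
  | fuel+1, (nY, nX, step) :: rest =>
    match (PySem.List.pyGet? grid nY).bind (fun row => PySem.List.pyGet? row nX) with
    | none => none
    | some v =>
      if v ≤ 1 then
        let q1 := if nX - 1 ≥ 0 then rest ++ [(nY, nX - 1, step + 1)] else rest
        let q2 := if nX + 1 < 3 then q1 ++ [(nY, nX + 1, step + 1)] else q1
        let q3 := if nY - 1 ≥ 0 then q2 ++ [(nY - 1, nX, step + 1)] else q2
        let q4 := if nY + 1 < 3 then q3 ++ [(nY + 1, nX, step + 1)] else q3
        BFS.loop grid fuel q4
      else some (nY, nX, step)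

def BFS (grid : List (List Int)) (y : Int) (x : Int) : Option (Int × Int × Int) :=
  BFS.loop grid 1000 [(y, x, 0)]

-- ===== PORT B =====
-- the inner 'for (mY, mX) in (…4 candidates…)' of Source B
def BFS_alt.push (step : Int) (st : List (Int × Int × Int) × PySem.Set (Int × Int))
    (c : Int × Int) : List (Int × Int × Int) × PySem.Set (Int × Int) :=
  if 0 ≤ c.2 ∧ c.2 < 3 ∧ 0 ≤ c.1 ∧ c.1 < 3 ∧ ¬ (PySem.Set.contains st.2 c = true) then
    (st.1 ++ [(c.1, c.2, step + 1)], PySem.Set.add st.2 c)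
  else st

-- pass 1 of Source B: value-free BFS recording the visitation order (fuel: ≤ 10 cells are ever enqueued)
def BFS_alt.gen : Nat → List (Int × Int × Int) → PySem.Set (Int × Int) →
    List (Int × Int × Int) → List (Int × Int × Int)
  | _, [], _, order => order
  | 0, _ :: _, _, order => order
  | fuel+1, (nY, nX, step) :: dq, seen, order =>
    let st := [(nY, nX - 1), (nY, nX + 1), (nY - 1, nX), (nY + 1, nX)].foldl
        (BFS_alt.push step) (dq, seen)
    BFS_alt.gen fuel st.1 st.2 (order ++ [(nY, nX, step)])

-- pass 2 of Source B
def BFS_alt.scan (grid : List (List Int)) : List (Int × Int × Int) → Option (Int × Int × Int)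
  | [] => none
  | (nY, nX, step) :: rest =>
    match (PySem.List.pyGet? grid nY).bind (fun row => PySem.List.pyGet? row nX) with
    | none => none
    | some v => if 1 < v then some (nY, nX, step) else BFS_alt.scan grid rest

def BFS_alt (grid : List (List Int)) (y : Int) (x : Int) : Option (Int × Int × Int) :=
  BFS_alt.scan grid (BFS_alt.gen 64 [(y, x, 0)] (PySem.Set.ofList [(y, x)]) [])

-- ===== PRECONDITION & SPEC =====
-- Pre_ admits the natural domain (a 3×3 grid, in-range start, some cell > 1 — elsewhere A raises
-- IndexError or loops forever) plus every immediate hit (the start cell itself holds > 1 stones,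
-- where A returns (y, x, 0) for any grid shape).  Excluded inputs on which A still returns are the
-- out-of-range starts resolved by Python's negative-index wraparound against the hardcoded bound 3
-- — an artefact of A's implementation (B returns None there).
def Pre_BFS (grid : List (List Int)) (y : Int) (x : Int) : Prop :=
  (grid.length = 3 ∧ (∀ row ∈ grid, row.length = 3) ∧ 0 ≤ y ∧ y < 3 ∧ 0 ≤ x ∧ x < 3
      ∧ ∃ row ∈ grid, ∃ v ∈ row, 1 < v)
  ∨ (((PySem.List.pyGet? grid y).bind (fun row => PySem.List.pyGet? row x)).any
      (fun v => decide (1 < v)) = true)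

instance (grid : List (List Int)) (y : Int) (x : Int) : Decidable (Pre_BFS grid y x) := by
  unfold Pre_BFS; infer_instance

def pvWitness_BFS : List (List Int) × Int × Int := ([[0, 0, 0], [0, 0, 0], [0, 0, 2]], 0, 0)

def Spec_BFS (grid : List (List Int)) (y : Int) (x : Int) (out : Option (Int × Int × Int)) : Prop :=
  out = BFS_alt grid y x
instance (grid : List (List Int)) (y : Int) (x : Int) (out : Option (Int × Int × Int)) :
    Decidable (Spec_BFS grid y x out) := by unfold Spec_BFS; infer_instance

-- ===== CLAIM (what is proved, stated in full; the proofs are below) =====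
def Claim_equal_BFS : Prop := ∀ (grid : List (List Int)) (y : Int) (x : Int),
  Dom_BFS grid y x → Pre_BFS grid y x → Spec_BFS grid y x (BFS grid y x)

-- ===== LEMMAS AND PROOFS =====

-- Both programs read the grid only through the test 'value > 1': factor them through the mask.
def pvMask (grid : List (List Int)) : List (List Bool) :=
  grid.map (fun r => r.map (fun v => decide (1 < v)))

def pvLoopM (m : List (List Bool)) : Nat → List (Int × Int × Int) → Option (Int × Int × Int)
  | _, [] => none
  | 0, _ :: _ => none
  | fuel+1, (nY, nX, step) :: rest =>
    match (PySem.List.pyGet? m nY).bind (fun row => PySem.List.pyGet? row nX) with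
    | none => none
    | some b =>
      if b = false then
        let q1 := if nX - 1 ≥ 0 then rest ++ [(nY, nX - 1, step + 1)] else rest
        let q2 := if nX + 1 < 3 then q1 ++ [(nY, nX + 1, step + 1)] else q1
        let q3 := if nY - 1 ≥ 0 then q2 ++ [(nY - 1, nX, step + 1)] else q2
        let q4 := if nY + 1 < 3 then q3 ++ [(nY + 1, nX, step + 1)] else q3
        pvLoopM m fuel q4
      else some (nY, nX, step)

def pvScanM (m : List (List Bool)) : List (Int × Int × Int) → Option (Int × Int × Int)
  | [] => none
  | (nY, nX, step) :: rest =>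
    match (PySem.List.pyGet? m nY).bind (fun row => PySem.List.pyGet? row nX) with
    | none => none
    | some b => if b then some (nY, nX, step) else pvScanM m rest

theorem pvPyGet?_map {α β : Type} (f : α → β) (xs : List α) (i : Int) :
    PySem.List.pyGet? (xs.map f) i = (PySem.List.pyGet? xs i).map f := by
  simp [PySem.List.pyGet?, PySem.List.pyIdx?]

theorem pvMask_lookup (grid : List (List Int)) (i j : Int) :
    (PySem.List.pyGet? (pvMask grid) i).bind (fun row => PySem.List.pyGet? row j)
      = ((PySem.List.pyGet? grid i).bind (fun row => PySem.List.pyGet? row j)).map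
          (fun v => decide (1 < v)) := by
  simp only [pvMask, pvPyGet?_map]
  cases PySem.List.pyGet? grid i with
  | none => rfl
  | some row => simp [pvPyGet?_map]

theorem pvLoop_eq (grid : List (List Int)) :
    ∀ (fuel : Nat) (queue : List (Int × Int × Int)),
      BFS.loop grid fuel queue = pvLoopM (pvMask grid) fuel queue := by
  intro fuel
  induction fuel with
  | zero => intro queue; cases queue with
    | nil => rfl
    | cons h t => rfl
  | succ n ih =>
    intro queue
    cases queue with
    | nil => rfl
    | cons h t =>
      obtain ⟨nY, nX, step⟩ := h
      simp only [BFS.loop, pvLoopM, pvMask_lookup]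
      cases hv : (PySem.List.pyGet? grid nY).bind (fun row => PySem.List.pyGet? row nX) with
      | none => rfl
      | some v =>
        simp only [Option.map_some]
        by_cases h1 : v ≤ 1
        · have hb : decide (1 < v) = false := by simp [not_lt.mpr h1]
          rw [if_pos h1, if_pos hb, ih]
        · have hb : ¬ (decide (1 < v) = false) := by simp [lt_of_not_ge h1]
          rw [if_neg h1, if_neg hb]

theorem pvScan_eq (grid : List (List Int)) :
    ∀ (order : List (Int × Int × Int)),
      BFS_alt.scan grid order = pvScanM (pvMask grid) order := by
  intro order
  induction order with
  | nil => rfl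
  | cons h t ih =>
    obtain ⟨nY, nX, step⟩ := h
    simp only [BFS_alt.scan, pvScanM, pvMask_lookup]
    cases hv : (PySem.List.pyGet? grid nY).bind (fun row => PySem.List.pyGet? row nX) with
    | none => rfl
    | some v =>
      simp only [Option.map_some]
      by_cases h1 : 1 < v
      · have hb : decide (1 < v) = true := by simp [h1]
        rw [if_pos h1, if_pos hb]
      · have hb : ¬ (decide (1 < v) = true) := by simp [h1]
        rw [if_neg h1, if_neg hb, ih]

-- gen only appends to the accumulated order
theorem pvGen_prefix : ∀ (fuel : Nat) (dq : List (Int × Int × Int))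
    (seen : PySem.Set (Int × Int)) (order : List (Int × Int × Int)),
    BFS_alt.gen fuel dq seen order = order ++ BFS_alt.gen fuel dq seen [] := by
  intro fuel
  induction fuel with
  | zero => intro dq seen order; cases dq with
    | nil => simp [BFS_alt.gen]
    | cons h t => simp [BFS_alt.gen]
  | succ n ih =>
    intro dq seen order
    cases dq with
    | nil => simp [BFS_alt.gen]
    | cons h t =>
      obtain ⟨nY, nX, step⟩ := h
      simp only [BFS_alt.gen]
      rw [ih _ _ (order ++ _), ih _ _ ([] ++ _)]
      simp

-- the finite core: on a 3×3 mask with an in-range start and at least one marked cell,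
-- A's duplicate-queue BFS and B's order-scan agree (checked over all 512 × 9 cases)
theorem pvCore : ∀ (a b c d e f g h i : Bool) (y x : Fin 3),
    (a || b || c || d || e || f || g || h || i) = true →
    pvLoopM [[a, b, c], [d, e, f], [g, h, i]] 1000 [((y : Int), (x : Int), 0)]
      = pvScanM [[a, b, c], [d, e, f], [g, h, i]]
          (BFS_alt.gen 64 [((y : Int), (x : Int), 0)]
            (PySem.Set.ofList [((y : Int), (x : Int))]) []) := by
  decide

-- ===== VERDICT (by name: the statement is the Claim_ definition above) =====
theorem BFS_spec : Claim_equal_BFS := by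
  intro grid y x _hdom hpre
  unfold Spec_BFS
  rcases hpre with ⟨hlen, hrows, hy0, hy3, hx0, hx3, hex⟩ | hhit
  · -- 3×3 in-range case: reduce to the finite core
    rcases grid with _ | ⟨r0, _ | ⟨r1, _ | ⟨r2, _ | ⟨r3, t⟩⟩⟩⟩ <;> simp at hlen
    have h0 := hrows r0 (by simp)
    have h1 := hrows r1 (by simp)
    have h2 := hrows r2 (by simp)
    rcases r0 with _ | ⟨a, _ | ⟨b, _ | ⟨c, _ | _⟩⟩⟩ <;> simp at h0
    rcases r1 with _ | ⟨d, _ | ⟨e, _ | ⟨f, _ | _⟩⟩⟩ <;> simp at h1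
    rcases r2 with _ | ⟨g, _ | ⟨h, _ | ⟨i, _ | _⟩⟩⟩ <;> simp at h2
    have hm : (decide (1 < a) || decide (1 < b) || decide (1 < c) || decide (1 < d) ||
        decide (1 < e) || decide (1 < f) || decide (1 < g) || decide (1 < h) ||
        decide (1 < i)) = true := by
      simp only [Bool.or_eq_true, decide_eq_true_eq]
      simp only [List.mem_cons, List.not_mem_nil] at hex
      obtain ⟨row, hrow, hv⟩ := hex
      rcases hrow with rfl | rfl | rfl | hF
      · obtain ⟨v, hvm, hlt⟩ := hv
        simp only [List.mem_cons, List.not_mem_nil] at hvm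
        rcases hvm with rfl | rfl | rfl | hF <;> tauto
      · obtain ⟨v, hvm, hlt⟩ := hv
        simp only [List.mem_cons, List.not_mem_nil] at hvm
        rcases hvm with rfl | rfl | rfl | hF <;> tauto
      · obtain ⟨v, hvm, hlt⟩ := hv
        simp only [List.mem_cons, List.not_mem_nil] at hvm
        rcases hvm with rfl | rfl | rfl | hF <;> tauto
      · exact hF.elim
    have hy : y = 0 ∨ y = 1 ∨ y = 2 := by omega
    have hx : x = 0 ∨ x = 1 ∨ x = 2 := by omega
    rw [BFS, BFS_alt, pvLoop_eq, pvScan_eq]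
    rcases hy with rfl | rfl | rfl <;> rcases hx with rfl | rfl | rfl
    · exact pvCore _ _ _ _ _ _ _ _ _ 0 0 hm
    · exact pvCore _ _ _ _ _ _ _ _ _ 0 1 hm
    · exact pvCore _ _ _ _ _ _ _ _ _ 0 2 hm
    · exact pvCore _ _ _ _ _ _ _ _ _ 1 0 hm
    · exact pvCore _ _ _ _ _ _ _ _ _ 1 1 hm
    · exact pvCore _ _ _ _ _ _ _ _ _ 1 2 hm
    · exact pvCore _ _ _ _ _ _ _ _ _ 2 0 hm
    · exact pvCore _ _ _ _ _ _ _ _ _ 2 1 hm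
    · exact pvCore _ _ _ _ _ _ _ _ _ 2 2 hm
  · -- immediate hit: both programs return (y, x, 0)
    cases hl : (PySem.List.pyGet? grid y).bind (fun row => PySem.List.pyGet? row x) with
    | none => rw [hl] at hhit; simp [Option.any] at hhit
    | some v =>
      rw [hl] at hhit
      simp only [Option.any, decide_eq_true_eq] at hhit
      have hv1 : ¬ v ≤ 1 := not_le.mpr hhit
      have hA : BFS grid y x = some (y, x, 0) := by
        rw [BFS, (by norm_num : (1000 : Nat) = 999 + 1)]
        simp only [BFS.loop, hl]
        rw [if_neg hv1]
      have hB : BFS_alt grid y x = some (y, x, 0) := by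
        rw [BFS_alt, (by norm_num : (64 : Nat) = 63 + 1)]
        simp only [BFS_alt.gen]
        rw [pvGen_prefix]
        simp only [List.nil_append, List.cons_append]
        simp only [BFS_alt.scan, hl]
        rw [if_pos hhit]
      rw [hA, hB]
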